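-- pv_equiv track=rewrite | github.com/J-a-r-W-i-z/Distributed-Systems | Assignment 3/Load Balancer/load_balancer.py | generate_response_string
-- ===== SOURCE A (Python) =====
-- def generate_response_string(servers):
--     result = ""
--     for i, num in enumerate(servers):
--         result += f"Server: {num}"
--         if i < len(servers) - 1:
--             result += ", "
--         if i == len(servers) - 2:
--             result += "and "
--
--     return result
-- ===== SOURCE B (Python) =====
-- def generate_response_string(servers):
--     parts = [f"Server: {num}" for num in servers]
--     if len(parts) >= 2:
--         parts[-1] = "and " + parts[-1]
--     return ", ".join(parts)
-- ===== Notes on version B (the rewrite author's own statement) =====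
-- stated objective: idiomatic
-- what changed: Replaced the indexed loop with += string accumulation and per-iteration index checks (i < len-1, i == len-2) by a comprehension building the piece list, one adjustment prepending 'and ' to the last piece, and a single ', '.join.
import Mathlib
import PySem

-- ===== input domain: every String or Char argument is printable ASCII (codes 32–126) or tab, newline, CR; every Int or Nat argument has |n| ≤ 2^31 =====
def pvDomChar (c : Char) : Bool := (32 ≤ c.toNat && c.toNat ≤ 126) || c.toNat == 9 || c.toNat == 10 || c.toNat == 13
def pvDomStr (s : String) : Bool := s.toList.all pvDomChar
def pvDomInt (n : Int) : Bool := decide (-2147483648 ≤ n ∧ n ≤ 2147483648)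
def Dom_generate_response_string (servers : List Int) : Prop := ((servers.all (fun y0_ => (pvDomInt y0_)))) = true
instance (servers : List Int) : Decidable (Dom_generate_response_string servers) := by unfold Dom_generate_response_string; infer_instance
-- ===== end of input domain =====

-- ===== PORT A =====
-- A: indexed loop, += accumulation, separator/'and ' decided per iteration by index checks.
def generate_response_string (servers : List Int) : String :=
  (PySem.List.enumerate servers).foldl
    (fun result p =>
      let result := result ++ "Server: " ++ PySem.Int.toStr p.2
      let result := if p.1 < PySem.List.len servers - 1 then result ++ ", " else result
      if p.1 = PySem.List.len servers - 2 then result ++ "and " else result)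
    ""

-- ===== PORT B =====
-- B (idiomatic): build the piece list, prepend "and " to the last piece when len >= 2, one join.
-- helper = B's `parts[-1] = "and " + parts[-1]`
def pvAndLast : List String → List String
  | [] => []
  | [x] => ["and " ++ x]
  | x :: y :: xs => x :: pvAndLast (y :: xs)

def generate_response_string_alt (servers : List Int) : String :=
  let parts := servers.map (fun num => "Server: " ++ PySem.Int.toStr num)
  let parts := if 2 ≤ parts.length then pvAndLast parts else parts
  PySem.Str.join ", " parts

-- ===== PRECONDITION & SPEC =====
def Spec_generate_response_string (servers : List Int) (out : String) : Prop := out = generate_response_string_alt servers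
instance (servers : List Int) (out : String) : Decidable (Spec_generate_response_string servers out) := by unfold Spec_generate_response_string; infer_instance

-- ===== CLAIM (what is proved, stated in full; the proofs are below) =====
def Claim_equal_generate_response_string : Prop := ∀ (servers : List Int), Dom_generate_response_string servers → Spec_generate_response_string servers (generate_response_string servers)

-- ===== LEMMAS AND PROOFS =====\n\n-- common recursive characterisation of the result
def pvTail : List Int → String
  | [] => ""
  | [x] => "Server: " ++ PySem.Int.toStr x
  | x :: y :: rest =>
      "Server: " ++ PySem.Int.toStr x ++ ", " ++ (if rest = [] then "and " else "") ++ pvTail (y :: rest)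

theorem join_nil_str : PySem.Str.join ", " [] = "" := by
  apply String.toList_injective; simp [PySem.Chars.join, List.intercalate]

theorem join_singleton_str (x : String) : PySem.Str.join ", " [x] = x := by
  apply String.toList_injective; simp [PySem.Chars.join, List.intercalate]

theorem join_cons_cons_str (x y : String) (xs : List String) :
    PySem.Str.join ", " (x :: y :: xs) = x ++ ", " ++ PySem.Str.join ", " (y :: xs) := by
  apply String.toList_injective
  simp [PySem.Chars.join_cons_cons]

theorem pvAndLast_cons_cons (x y : String) (xs : List String) :
    pvAndLast (x :: y :: xs) = x :: pvAndLast (y :: xs) := rfl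

theorem foldA (n : Int) (l : List Int) : ∀ (s : Int) (acc : String), s + l.length = n →
    (PySem.List.enumerate l s).foldl
      (fun result p =>
        let result := result ++ "Server: " ++ PySem.Int.toStr p.2
        let result := if p.1 < n - 1 then result ++ ", " else result
        if p.1 = n - 2 then result ++ "and " else result)
      acc = acc ++ pvTail l := by
  induction l with
  | nil => intro s acc h; simp [PySem.List.enumerate_nil, pvTail]
  | cons x rest ih =>
    intro s acc h
    rw [PySem.List.enumerate_cons, List.foldl_cons]
    match rest, ih with
    | [], _ =>
      simp at h
      have h1 : ¬ (s < n - 1) := by omega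
      have h2 : ¬ (s = n - 2) := by omega
      simp only [h1, h2, if_false]
      simp [PySem.List.enumerate_nil, pvTail, String.append_assoc]
    | y :: rest', ih =>
      have hlen : s + (rest'.length : Int) + 2 = n := by
        simp only [List.length_cons] at h; push_cast at h; omega
      have h1 : s < n - 1 := by omega
      rw [ih (s + 1) _ (by simp only [List.length_cons]; push_cast; omega)]
      by_cases h2 : rest' = []
      · subst h2
        have hs : s = n - 2 := by simp at hlen; omega
        simp only [pvTail, hs]
        simp [String.append_assoc]
      · have h2' : s ≠ n - 2 := by
          intro e
          apply h2
          have : (rest'.length : Int) = 0 := by omega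
          simpa using List.length_eq_zero_iff.mp (by exact_mod_cast this)
        simp only [pvTail, if_pos h1, if_neg h2', if_neg h2]
        simp [String.append_assoc]

theorem altB (l : List Int) : generate_response_string_alt l = pvTail l := by
  unfold generate_response_string_alt
  match l with
  | [] => simp [pvTail, join_nil_str]
  | [x] => simp [pvTail, join_singleton_str]
  | x :: y :: rest =>
    simp only [List.map_cons, List.length_cons, List.length_map]
    rw [if_pos (by omega)]
    induction rest generalizing x y with
    | nil =>
      simp only [List.map_nil, pvAndLast]
      rw [join_cons_cons_str, join_singleton_str]
      apply String.toList_injective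
      simp [pvTail]
    | cons z rest' ih =>
      simp only [List.map_cons] at ih ⊢
      rw [pvAndLast_cons_cons]
      have hne : pvAndLast (("Server: " ++ PySem.Int.toStr y)
          :: ("Server: " ++ PySem.Int.toStr z)
          :: List.map (fun num => "Server: " ++ PySem.Int.toStr num) rest') ≠ [] := by
        rw [pvAndLast_cons_cons]; simp
      obtain ⟨q, qs, hq⟩ := List.exists_cons_of_ne_nil hne
      rw [hq, join_cons_cons_str, ← hq, ih y z]
      simp [pvTail, String.append_assoc]

-- ===== VERDICT (by name: the statement is the Claim_ definition above) =====
theorem generate_response_string_spec : Claim_equal_generate_response_string := by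
  intro servers _
  unfold Spec_generate_response_string generate_response_string
  rw [altB]
  have := foldA (PySem.List.len servers) servers 0 "" (by simp [PySem.List.len_eq])
  rw [this]
  apply String.toList_injective
  simp
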